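-- pv_equiv track=rewrite | github.com/ShriPrathaa/Google-Foobar-Challenge | foobar1.py | solution
-- ===== SOURCE A (Python) =====
-- def solution(s):
--     index=1
--     c=s[0]
--     l=len(s)
--     while((len(c)+index)<=l):
--         a=s[index:len(c)+index]
--         if(c!=a):
--             c+=s[index]
--             index+=1
--         elif (c==a):
--             if(l%len(c)==0):
--                 lina=(l//len(c))
--                 if(s==c*lina):
--                     return lina
--                 else:
--                     c+=s[index]
--                     index+=1
--             else:
--                 c+=s[index]
--                 index+=1
--     return 1
-- ===== SOURCE B (Python) =====
-- def solution(s):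
--     # Scan divisors d of len(s) in increasing order; the first prefix length d
--     # whose repetition rebuilds s gives the maximal repetition count len(s)//d.
--     n = len(s)
--     for d in range(1, n + 1):
--         if n % d == 0 and s == s[:d] * (n // d):
--             return n // d
--     return 1
-- ===== Notes on version B (the rewrite author's own statement) =====
-- stated objective: faster
-- what changed: A grows a candidate prefix one character at a time, re-comparing slices and rebuilding c*lina at every step; B scans the divisors of len(s) once and checks only prefix lengths dividing len(s), returning at the first (hence smallest) period.
import Mathlib
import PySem

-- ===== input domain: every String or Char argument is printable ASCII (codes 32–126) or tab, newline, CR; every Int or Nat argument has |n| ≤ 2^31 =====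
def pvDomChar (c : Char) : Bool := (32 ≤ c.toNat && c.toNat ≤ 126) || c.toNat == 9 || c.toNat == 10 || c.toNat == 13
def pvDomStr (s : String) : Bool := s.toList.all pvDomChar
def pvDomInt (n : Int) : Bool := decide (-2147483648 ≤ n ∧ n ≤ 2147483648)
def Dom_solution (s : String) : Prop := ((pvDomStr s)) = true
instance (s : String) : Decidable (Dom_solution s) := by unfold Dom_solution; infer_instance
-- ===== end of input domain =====

-- B replaces A's incremental prefix-growing scan by a scan over divisors of len(s) only.

-- ===== PORT A =====
-- While loop ported with fuel (one fuel unit per iteration; fuel = l + 1 always suffices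
-- since index grows every iteration and the loop needs index + len(c) ≤ l).
-- `c += s[index]` is in range whenever reached from `solution`; the pyGet? none case
-- (Python IndexError) appends nothing and is unreachable under Pre_.
def solLoopA (xs : List Char) (l : Nat) : Nat → List Char → Nat → Int
  | 0, _, _ => 1
  | fuel + 1, c, index =>
    if c.length + index ≤ l then
      let a := PySem.List.slice xs (some (index : Int)) (some ((c.length : Int) + (index : Int)))
      if c ≠ a then
        solLoopA xs l fuel (c ++ (PySem.List.pyGet? xs (index : Int)).toList) (index + 1)
      else
        if l % c.length = 0 then
          if xs = (List.replicate (l / c.length) c).flatten then ((l / c.length : Nat) : Int)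
          else solLoopA xs l fuel (c ++ (PySem.List.pyGet? xs (index : Int)).toList) (index + 1)
        else solLoopA xs l fuel (c ++ (PySem.List.pyGet? xs (index : Int)).toList) (index + 1)
    else 1

def solution (s : String) : Int :=
  match PySem.List.pyGet? s.toList 0 with   -- c = s[0]: IndexError on empty s (excluded by Pre_)
  | none => 0
  | some ch => solLoopA s.toList s.toList.length (s.toList.length + 1) [ch] 1

-- ===== PORT B =====
-- for d in range(1, n+1): first d with n % d == 0 and s == s[:d] * (n // d); fuel = n + 1 suffices.
def altLoopB (xs : List Char) (n : Nat) : Nat → Nat → Int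
  | 0, _ => 1
  | fuel + 1, d =>
    if d ≤ n then
      if n % d = 0 ∧ xs = (List.replicate (n / d) (PySem.List.slice xs none (some (d : Int)))).flatten
      then ((n / d : Nat) : Int)
      else altLoopB xs n fuel (d + 1)
    else 1

def solution_alt (s : String) : Int :=
  altLoopB s.toList s.toList.length (s.toList.length + 1) 1

-- ===== PRECONDITION & SPEC =====
-- Pre_ excludes only the empty string, on which A raises IndexError at s[0].
def Pre_solution (s : String) : Prop := s.toList ≠ []
instance (s : String) : Decidable (Pre_solution s) := by unfold Pre_solution; infer_instance
def pvWitness_solution : String := "abab"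

def Spec_solution (s : String) (out : Int) : Prop := out = solution_alt s
instance (s : String) (out : Int) : Decidable (Spec_solution s out) := by unfold Spec_solution; infer_instance

-- ===== CLAIM (what is proved, stated in full; the proofs are below) =====
def Claim_equal_solution : Prop := ∀ (s : String), Dom_solution s → Pre_solution s → Spec_solution s (solution s)
-- ===== LEMMAS AND PROOFS =====

-- "prefix length k is a period dividing the length": exactly B's loop condition at d = k.
def IsRep (xs : List Char) (k : Nat) : Prop :=
  xs.length % k = 0 ∧ xs = (List.replicate (xs.length / k) (xs.take k)).flatten

lemma length_take_of_le {xs : List Char} {k : Nat} (h : k ≤ xs.length) :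
    (xs.take k).length = k := by simp [List.length_take]; omega

lemma isRep_length {xs : List Char} (h : xs ≠ []) : IsRep xs xs.length := by
  have hn : 0 < xs.length := List.length_pos_iff.mpr h
  refine ⟨Nat.mod_self _, ?_⟩
  rw [Nat.div_self hn]
  simp

lemma two_mul_le_of_dvd {k n : Nat} (hk : 1 ≤ k) (hkn : k < n) (hdvd : n % k = 0) :
    k + k ≤ n := by
  obtain ⟨q, hq⟩ := Nat.dvd_of_mod_eq_zero hdvd
  have hq2 : 2 ≤ q := by
    by_contra h
    interval_cases q <;> omega
  have := Nat.mul_le_mul_left k hq2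
  omega

lemma drop_take_eq_take {xs : List Char} {k : Nat} (hk : 1 ≤ k)
    (h2 : k + k ≤ xs.length) (hrep : IsRep xs k) :
    (xs.drop k).take k = xs.take k := by
  obtain ⟨hmod, hflat⟩ := hrep
  set p := xs.take k with hp
  have hlen : p.length = k := length_take_of_le (by omega)
  have hq2 : 2 ≤ xs.length / k := (Nat.le_div_iff_mul_le (by omega : 0 < k)).mpr (by omega)
  obtain ⟨m, hm⟩ : ∃ m, xs.length / k = m + 2 := ⟨xs.length / k - 2, by omega⟩
  rw [hm] at hflat
  have : xs = p ++ (p ++ (List.replicate m p).flatten) := by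
    simpa [List.replicate_succ] using hflat
  rw [this]
  rw [← hlen, List.drop_left, List.take_left]

lemma tailB_one {xs : List Char} (hne : xs ≠ []) :
    ∀ fuel k, 1 ≤ k → xs.length < k + k → xs.length + 1 ≤ fuel + k →
      altLoopB xs xs.length fuel k = 1 := by
  intro fuel
  induction fuel with
  | zero => intro k _ _ _; rfl
  | succ f ih =>
    intro k hk h2 hf
    show altLoopB xs xs.length (f + 1) k = 1
    rw [altLoopB]
    by_cases hkn : k ≤ xs.length
    · rw [if_pos hkn]
      rcases Nat.lt_or_ge k xs.length with hlt | hge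
      · have hneg : ¬ (xs.length % k = 0 ∧
            xs = (List.replicate (xs.length / k) (PySem.List.slice xs none (some (k : Int)))).flatten) := by
          rintro ⟨hmod, -⟩
          exact absurd (two_mul_le_of_dvd hk hlt hmod) (by omega)
        rw [if_neg hneg]
        exact ih (k + 1) (by omega) (by omega) (by omega)
      · have hkeq : k = xs.length := by omega
        subst hkeq
        have hrep := isRep_length hne
        rw [if_pos]
        · have hn : 0 < xs.length := List.length_pos_iff.mpr hne
          rw [Nat.div_self hn]; rfl
        · rcases hrep with ⟨hmod, hflat⟩
          refine ⟨hmod, ?_⟩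
          rw [PySem.List.slice_to_natCast]
          exact hflat
    · rw [if_neg hkn]

lemma pyGet?_lt {xs : List Char} {k : Nat} (h : k < xs.length) :
    PySem.List.pyGet? xs (k : Int) = some xs[k] := by
  rw [PySem.List.pyGet?_natCast]
  exact List.getElem?_eq_getElem h

lemma take_succ_of_lt {xs : List Char} {k : Nat} (h : k < xs.length) :
    xs.take k ++ [xs[k]] = xs.take (k + 1) := by
  rw [List.take_add_one, List.getElem?_eq_getElem h]
  rfl

lemma main_loop {xs : List Char} (hne : xs ≠ []) :
    ∀ fuelA fuelB k, 1 ≤ k → k ≤ xs.length →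
      xs.length + 1 ≤ 2 * fuelA + 2 * k → xs.length + 1 ≤ fuelB + k →
      solLoopA xs xs.length fuelA (xs.take k) k = altLoopB xs xs.length fuelB k := by
  intro fuelA
  induction fuelA with
  | zero =>
    intro fuelB k hk hkn hfa hfb
    show (1 : Int) = _
    exact (tailB_one hne fuelB k hk (by omega) hfb).symm
  | succ f ih =>
    intro fuelB k hk hkn hfa hfb
    have hlen : (xs.take k).length = k := length_take_of_le hkn
    show solLoopA xs xs.length (f + 1) (xs.take k) k = _
    rw [solLoopA]
    simp only [hlen]
    by_cases hcond : k + k ≤ xs.length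
    · rw [if_pos hcond]
      have hklt : k < xs.length := by omega
      -- the slice s[index : len(c)+index] is (drop k).take k
      have hslice : PySem.List.slice xs (some (k : Int)) (some ((k : Int) + (k : Int)))
          = (xs.drop k).take k := by
        have : ((k : Int) + (k : Int)) = ((k + k : Nat) : Int) := by push_cast; ring
        rw [this, PySem.List.slice_natCast]
        congr 1
        omega
      obtain ⟨fb, rfl⟩ : ∃ fb, fuelB = fb + 1 := ⟨fuelB - 1, by omega⟩
      rw [altLoopB, if_pos (by omega : k ≤ xs.length)]
      rw [PySem.List.slice_to_natCast]
      by_cases hrep : IsRep xs k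
      · -- both return xs.length / k
        have hca : xs.take k = (xs.drop k).take k := (drop_take_eq_take hk hcond hrep).symm
        rcases hrep with ⟨hmod, hflat⟩
        rw [if_neg (by simp only [hslice]; exact fun h => h hca)]
        rw [if_pos hmod, if_pos hflat, if_pos ⟨hmod, hflat⟩]
      · -- both advance to k + 1
        have hnext : xs.take k ++ (PySem.List.pyGet? xs (k : Int)).toList = xs.take (k + 1) := by
          rw [pyGet?_lt hklt]
          exact take_succ_of_lt hklt
        have hrec : solLoopA xs xs.length f (xs.take k ++ (PySem.List.pyGet? xs (k : Int)).toList) (k + 1)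
            = altLoopB xs xs.length fb (k + 1) := by
          rw [hnext]
          exact ih fb (k + 1) (by omega) (by omega) (by omega) (by omega)
        have hBneg : ¬(xs.length % k = 0 ∧
            xs = (List.replicate (xs.length / k) (xs.take k)).flatten) := hrep
        rw [if_neg hBneg]
        split_ifs with h1 h2 h3
        · exact hrec
        · -- c = a, mod = 0, xs = flatten : would be IsRep, contradiction
          exact absurd ⟨h2, h3⟩ hrep
        · exact hrec
        · exact hrec
    · rw [if_neg hcond]
      exact (tailB_one hne fuelB k hk (by omega) hfb).symm

-- ===== VERDICT (by name: the statement is the Claim_ definition above) =====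
theorem solution_spec : Claim_equal_solution := by
  intro s _ hpre
  unfold Spec_solution solution solution_alt
  have hne : s.toList ≠ [] := hpre
  rcases hx : s.toList with _ | ⟨a, l⟩
  · exact absurd hx hne
  · have h0 : PySem.List.pyGet? (a :: l) 0 = some a := by simp [pysem]
    rw [h0]
    exact main_loop (by simp) ((a :: l).length + 1) ((a :: l).length + 1) 1 (by omega)
      (by simp) (by simp; omega) (by omega)
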